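-- pv_equiv track=rewrite | github.com/MouadBaghdadi/RefactoringTask | validate_dataset.py | extract_code_and_reformulation
-- ===== SOURCE A (Python) =====
-- def extract_code_and_reformulation(data):
--     original_code = []
--     reformulation = []
--     lines = data.split('\n')
--     i = 0
--     current_original_code = []
--
--     while i < len(lines):
--         line = lines[i]
--         if line.lstrip().startswith('# reformulation'):
--             # Skip the '# reformulation' line
--             i += 1
--             current_reformulation = []
--             while i < len(lines) and lines[i].strip():
--                 current_reformulation.append(lines[i])
--                 i += 1
--             # Join the reformulation code block and append
--             reformulation.append('\n'.join(current_reformulation))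
--             # Append the collected original code block
--             original_code.append('\n'.join(current_original_code))
--             current_original_code = []
--         elif line.strip():  # Include non-empty lines only
--             current_original_code.append(line)
--         i += 1
--
--     # Add any remaining original code if no final reformulation marker is present
--     if current_original_code:
--         original_code.append('\n'.join(current_original_code))
--
--     # Ensure both lists are of equal length
--     while len(reformulation) < len(original_code):
--         reformulation.append('')
--
--     return original_code, reformulation
-- ===== SOURCE B (Python) =====
-- def extract_code_and_reformulation(data):
--     original_code = []
--     reformulation = []
--     current = []
--     collecting_reformulation = False
--
--     for line in data.split('\n'):
--         if collecting_reformulation: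
--             if line.strip():
--                 current.append(line)
--             else:
--                 reformulation.append('\n'.join(current))
--                 current = []
--                 collecting_reformulation = False
--         elif line.lstrip().startswith('# reformulation'):
--             original_code.append('\n'.join(current))
--             current = []
--             collecting_reformulation = True
--         elif line.strip():
--             current.append(line)
--
--     if collecting_reformulation:
--         reformulation.append('\n'.join(current))
--     elif current:
--         original_code.append('\n'.join(current))
--
--     reformulation += [''] * (len(original_code) - len(reformulation))
--     return original_code, reformulation
-- ===== Notes on version B (the rewrite author's own statement) =====
-- stated objective: simpler
-- what changed: Replaces A's explicit index with a nested inner while-loop (plus a trailing while padding loop) by a single flat for-loop over the lines driven by a collecting_reformulation mode flag, with padding done by list multiplication.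
import Mathlib
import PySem

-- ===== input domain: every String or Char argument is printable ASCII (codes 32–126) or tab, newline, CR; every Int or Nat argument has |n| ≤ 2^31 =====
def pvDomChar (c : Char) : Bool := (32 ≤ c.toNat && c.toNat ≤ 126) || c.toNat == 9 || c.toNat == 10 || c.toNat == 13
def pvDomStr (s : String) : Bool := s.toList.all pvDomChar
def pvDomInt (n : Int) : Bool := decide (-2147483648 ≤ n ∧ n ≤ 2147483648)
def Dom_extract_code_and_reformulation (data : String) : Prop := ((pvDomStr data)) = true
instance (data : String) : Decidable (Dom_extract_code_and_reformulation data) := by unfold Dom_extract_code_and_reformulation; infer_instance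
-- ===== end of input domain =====

-- B replaces A's index variable and nested inner while-loop by one flat for-loop over the
-- lines driven by a collecting_reformulation mode flag (objective: simpler decomposition).

-- shared one-line predicates (each port uses them where its Python writes the same test)
def pvNonblank (l : String) : Bool := PySem.Str.strip l != ""
def pvMarker (l : String) : Bool := PySem.Str.startswith (PySem.Str.lstrip l) "# reformulation"

-- ===== PORT A =====
-- A's trailing pad: while len(reformulation) < len(original_code): reformulation.append('')
def pvPadA (orig refo : List String) : List String :=
  if refo.length < orig.length then pvPadA orig (refo ++ [""]) else refo
termination_by orig.length - refo.length
decreasing_by simp; omega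

-- A's outer while over the remaining lines; the inner while-loop is the takeWhile/dropWhile
-- over the same suffix (collect lines while strip() is truthy), then i += 1 drops the blank.
def pvLoopA (lines orig refo cur : List String) : List String × List String :=
  match lines with
  | [] =>
      let orig := if cur ≠ [] then orig ++ [PySem.Str.join "\n" cur] else orig
      (orig, pvPadA orig refo)
  | line :: rest =>
      if pvMarker line then
        let blk := rest.takeWhile pvNonblank
        let rest' := (rest.dropWhile pvNonblank).drop 1
        pvLoopA rest' (orig ++ [PySem.Str.join "\n" cur]) (refo ++ [PySem.Str.join "\n" blk]) []
      else if pvNonblank line then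
        pvLoopA rest orig refo (cur ++ [line])
      else
        pvLoopA rest orig refo cur
termination_by lines.length
decreasing_by
  · have h1 := List.length_dropWhile_le (p := pvNonblank) (l := rest)
    simp at *; omega
  · simp
  · simp

def extract_code_and_reformulation (data : String) : List String × List String :=
  pvLoopA ((PySem.Str.split? data "\n").getD []) [] [] []

-- ===== PORT B =====
-- state: (original_code, reformulation, current, collecting_reformulation)
def pvStepB (st : List String × List String × List String × Bool) (line : String) :
    List String × List String × List String × Bool :=
  let (orig, refo, cur, mode) := st
  if mode then
    if pvNonblank line then (orig, refo, cur ++ [line], true)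
    else (orig, refo ++ [PySem.Str.join "\n" cur], [], false)
  else if pvMarker line then (orig ++ [PySem.Str.join "\n" cur], refo, [], true)
  else if pvNonblank line then (orig, refo, cur ++ [line], false)
  else st

def pvFinishB (st : List String × List String × List String × Bool) : List String × List String :=
  let (orig, refo, cur, mode) := st
  let (orig, refo) :=
    if mode then (orig, refo ++ [PySem.Str.join "\n" cur])
    else if cur ≠ [] then (orig ++ [PySem.Str.join "\n" cur], refo)
    else (orig, refo)
  (orig, refo ++ List.replicate (orig.length - refo.length) "")

def extract_code_and_reformulation_alt (data : String) : List String × List String :=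
  pvFinishB (((PySem.Str.split? data "\n").getD []).foldl pvStepB ([], [], [], false))

-- ===== PRECONDITION & SPEC =====
def Spec_extract_code_and_reformulation (data : String) (out : List String × List String) : Prop := out = extract_code_and_reformulation_alt data
instance (data : String) (out : List String × List String) : Decidable (Spec_extract_code_and_reformulation data out) := by unfold Spec_extract_code_and_reformulation; infer_instance

-- ===== CLAIM (what is proved, stated in full; the proofs are below) =====
def Claim_equal_extract_code_and_reformulation : Prop := ∀ (data : String), Dom_extract_code_and_reformulation data → Spec_extract_code_and_reformulation data (extract_code_and_reformulation data)

-- ===== LEMMAS AND PROOFS =====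

theorem pvPadA_eq (orig refo : List String) :
    pvPadA orig refo = refo ++ List.replicate (orig.length - refo.length) "" := by
  by_cases h : refo.length < orig.length
  · rw [pvPadA, if_pos h, pvPadA_eq]
    have : orig.length - refo.length = (orig.length - (refo.length + 1)) + 1 := by omega
    simp [this, List.replicate_succ]
  · rw [pvPadA, if_neg h]
    have : orig.length - refo.length = 0 := by omega
    simp [this]
termination_by orig.length - refo.length
decreasing_by simp; omega

-- while in reformulation mode, B's fold consumes exactly the nonblank prefix (A's inner while),
-- flushes it, drops the terminating blank line (if any) and is back in code mode
theorem pvRefoMode (lines : List String) (orig refo cur : List String) :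
    pvFinishB (lines.foldl pvStepB (orig, refo, cur, true)) =
      pvFinishB (((lines.dropWhile pvNonblank).drop 1).foldl pvStepB
        (orig, refo ++ [PySem.Str.join "\n" (cur ++ lines.takeWhile pvNonblank)], [], false)) := by
  induction lines generalizing cur with
  | nil => simp [pvFinishB]
  | cons line rest ih =>
      by_cases h : pvNonblank line = true
      · simp only [List.foldl_cons, List.takeWhile_cons, List.dropWhile_cons, h, if_pos,
          pvStepB]
        rw [ih (cur ++ [line])]
        simp
      · simp only [List.foldl_cons, List.takeWhile_cons, List.dropWhile_cons, h, pvStepB]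
        simp

theorem pvMainLemma (lines orig refo cur : List String) :
    pvLoopA lines orig refo cur = pvFinishB (lines.foldl pvStepB (orig, refo, cur, false)) := by
  induction lines, orig, refo, cur using pvLoopA.induct with
  | case1 orig refo cur =>
      simp [pvLoopA, pvFinishB, pvPadA_eq]
      split_ifs with h <;> simp
  | case2 orig refo cur line rest hm blk rest' ih =>
      rw [pvLoopA]
      simp only [hm, if_pos]
      rw [ih]
      simp only [List.foldl_cons, pvStepB, Bool.false_eq_true, if_false, hm, if_true]
      rw [pvRefoMode]
      simp only [blk, rest', List.drop_one, List.nil_append]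
  | case3 orig refo cur line rest hm hnb ih =>
      rw [pvLoopA]
      simp only [hm, hnb, if_pos, if_neg, Bool.not_eq_true]
      rw [ih]
      simp only [List.foldl_cons, pvStepB, Bool.false_eq_true, if_false, hm, hnb]
      simp
  | case4 orig refo cur line rest hm hnb ih =>
      rw [pvLoopA]
      simp only [hm, hnb, if_neg, Bool.not_eq_true]
      rw [ih]
      simp only [List.foldl_cons, pvStepB, Bool.false_eq_true, if_false, hm, hnb]

-- ===== VERDICT (by name: the statement is the Claim_ definition above) =====
theorem extract_code_and_reformulation_spec : Claim_equal_extract_code_and_reformulation := by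
  intro data _
  unfold Spec_extract_code_and_reformulation extract_code_and_reformulation
    extract_code_and_reformulation_alt
  exact pvMainLemma _ _ _ _
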